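-- pv_equiv track=rewrite | github.com/LakshitXD/cipher | cipher.py | solve
-- ===== SOURCE A (Python) =====
-- def solve(text):
--     result = ""
--
--     # traverse text
--     for i in range(len(text)):
--         char = text[i]
--         if(i%2==0):
--             s=13
--         else:
--             s=5
--
--         # Encrypt uppercase characters
--         if (char.isupper()):
--             result += chr((ord(char) + s-65) % 26 + 65)
--
--         # Encrypt lowercase characters
--         else:
--             result += chr((ord(char) + s - 97) % 26 + 97)
--
--     return result
-- ===== SOURCE B (Python) =====
-- def solve(text):
--     # Split into even- and odd-index slices, shift each slice with its own
--     # fixed shift (13 / 5), then interleave the two shifted halves back.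
--     def enc(c, s):
--         base = 65 if c.isupper() else 97
--         return chr((ord(c) + s - base) % 26 + base)
--
--     even = [enc(c, 13) for c in text[::2]]
--     odd = [enc(c, 5) for c in text[1::2]]
--     out = []
--     for e, o in zip(even, odd):
--         out.append(e)
--         out.append(o)
--     if len(even) > len(odd):
--         out.append(even[-1])
--     return "".join(out)
-- ===== Notes on version B (the rewrite author's own statement) =====
-- stated objective: alternative
-- what changed: Replaces the indexed loop with a per-character parity test by slicing the text into even- and odd-index halves (text[::2] / text[1::2]), shifting each half with its single fixed shift (13 resp. 5), and interleaving the two shifted halves back, preserving the trailing char of odd-length input.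
import Mathlib
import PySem

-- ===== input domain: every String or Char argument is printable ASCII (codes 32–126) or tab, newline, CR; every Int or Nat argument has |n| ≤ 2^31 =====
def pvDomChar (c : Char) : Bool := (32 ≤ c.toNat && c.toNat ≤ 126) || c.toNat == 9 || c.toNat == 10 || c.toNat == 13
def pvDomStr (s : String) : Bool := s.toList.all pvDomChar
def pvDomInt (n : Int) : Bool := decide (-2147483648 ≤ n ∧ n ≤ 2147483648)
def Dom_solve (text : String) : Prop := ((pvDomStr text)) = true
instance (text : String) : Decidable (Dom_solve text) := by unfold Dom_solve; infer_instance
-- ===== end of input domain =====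

-- B splits the text into even/odd-index slices, shifts each with its fixed amount and interleaves them back; A walks indices with a parity test.

-- ===== PORT A =====
-- literal transliteration of A: index loop over range(len(text)), parity choosing the shift,
-- appending one encrypted char per step.  char.isupper() on the 1-char string text[i] is
-- PySem.Chars.isupper on that char; the pyGetD default is never used (i is in range).
def solve (text : String) : String :=
  let l := text.toList
  let result := (PySem.List.pyRange 0 (l.length : Int) 1).foldl (fun result i =>
    let char := PySem.List.pyGetD l i ' '
    let s : Int := if PySem.Int.mod i 2 = 0 then 13 else 5
    if PySem.Chars.isupper char then
      result ++ [Char.ofNat (PySem.Int.mod ((char.toNat : Int) + s - 65) 26 + 65).toNat]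
    else
      result ++ [Char.ofNat (PySem.Int.mod ((char.toNat : Int) + s - 97) 26 + 97).toNat]) []
  String.ofList result

-- ===== PORT B =====
-- helper enc of Source B
def encB (c : Char) (s : Int) : Char :=
  let base : Int := if PySem.Chars.isupper c then 65 else 97
  Char.ofNat (PySem.Int.mod ((c.toNat : Int) + s - base) 26 + base).toNat

-- literal transliteration of B: text[::2] / text[1::2] (step-2 slices; step ≠ 0 so the
-- .getD [] default is never used), map enc over each, zip-interleave, keep the trailing
-- even char when the length is odd (even[-1] is pyGetD at -1; nonempty there).
def solve_alt (text : String) : String :=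
  let l := text.toList
  let even := ((PySem.List.slice? l none none 2).getD []).map (fun c => encB c 13)
  let odd := ((PySem.List.slice? l (some 1) none 2).getD []).map (fun c => encB c 5)
  let out := (even.zip odd).foldl (fun out p => out ++ [p.1, p.2]) []
  let out := if odd.length < even.length then out ++ [PySem.List.pyGetD even (-1) ' '] else out
  String.ofList out

-- ===== PRECONDITION & SPEC =====
def Spec_solve (text : String) (out : String) : Prop := out = solve_alt text
instance (text : String) (out : String) : Decidable (Spec_solve text out) := by unfold Spec_solve; infer_instance

-- ===== CLAIM (what is proved, stated in full; the proofs are below) =====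
def Claim_equal_solve : Prop := ∀ (text : String), Dom_solve text → Spec_solve text (solve text)



-- ===== LEMMAS AND PROOFS =====

-- even-index elements of a list
def evensL {α : Type} : List α → List α
  | [] => []
  | [a] => [a]
  | a :: _ :: r => a :: evensL r

-- the common value: alternating-shift map, two chars per step
def altMap : List Char → List Char
  | [] => []
  | [a] => [encB a 13]
  | a :: b :: r => encB a 13 :: encB b 5 :: altMap r

lemma evensL_cons {α : Type} (x : α) (r : List α) :
    evensL (x :: r) = x :: evensL r.tail := by
  cases r <;> rfl

lemma range_filterMap_even {α : Type} : ∀ (l : List α),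
    (List.range ((l.length + 1) / 2)).filterMap (fun k => l[2 * k]?) = evensL l := by
  intro l
  induction l using evensL.induct with
  | case1 => simp [evensL]
  | case2 a => simp [evensL]
  | case3 a b r ih =>
    have h2 : ((a :: b :: r).length + 1) / 2 = (r.length + 1) / 2 + 1 := by
      simp; omega
    have hshift : ∀ k : Nat, (a :: b :: r)[2 * (k + 1)]? = r[2 * k]? := by
      intro k
      have : 2 * (k + 1) = 2 * k + 1 + 1 := by ring
      rw [this]
      simp
    rw [h2, List.range_succ_eq_map, List.filterMap_cons]
    simp only [List.filterMap_map, Function.comp, Nat.succ_eq_add_one, hshift]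
    simp [ih, evensL]

lemma range_filterMap_odd {α : Type} : ∀ (l : List α),
    (List.range (l.length / 2)).filterMap (fun k => l[2 * k + 1]?) = evensL l.tail := by
  intro l
  induction l using evensL.induct with
  | case1 => simp [evensL]
  | case2 a => simp [evensL]
  | case3 a b r ih =>
    have h2 : (a :: b :: r).length / 2 = r.length / 2 + 1 := by
      simp; omega
    have hshift : ∀ k : Nat, (a :: b :: r)[2 * (k + 1) + 1]? = r[2 * k + 1]? := by
      intro k
      have : 2 * (k + 1) + 1 = 2 * k + 1 + 1 + 1 := by ring
      rw [this]
      simp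
    rw [h2, List.range_succ_eq_map, List.filterMap_cons]
    simp only [List.filterMap_map, Function.comp, Nat.succ_eq_add_one, hshift]
    simp [ih, evensL_cons]

lemma slice2_none (l : List Char) :
    PySem.List.slice? l none none 2 = some (evensL l) := by
  rw [← range_filterMap_even l]
  simp only [PySem.List.slice?, PySem.List.sliceIndices]
  norm_num
  rcases Nat.eq_zero_or_pos l.length with h | h
  · simp [h]
  · rw [if_pos h]
    have hc : (((l.length : Int) + 2 - 1) / 2).toNat = (l.length + 1) / 2 := by omega
    rw [hc]
    exact List.filterMap_congr fun k _ => by congr 1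

lemma slice2_one (l : List Char) :
    PySem.List.slice? l (some 1) none 2 = some (evensL l.tail) := by
  rw [← range_filterMap_odd l]
  simp only [PySem.List.slice?, PySem.List.sliceIndices]
  norm_num
  rcases Nat.eq_zero_or_pos l.length with h | h
  · simp [h]
  · have hmin : min (1 : Int) (l.length : Int) = 1 := by omega
    rw [hmin]
    have hc : (if 1 < l.length then
        (((l.length : Int) - 1 + 2 - 1) / 2).toNat else 0) = l.length / 2 := by
      split_ifs with h1 <;> omega
    rw [hc]
    exact List.filterMap_congr fun k _ => by congr 1; omega

-- A's index loop, seen as a map over range, equals the two-at-a-time alternating map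
lemma mapG_eq_altMap : ∀ l : List Char,
    (List.range l.length).map
      (fun k => encB (l.getD k ' ') (if k % 2 = 0 then 13 else 5)) = altMap l := by
  intro l
  induction l using altMap.induct with
  | case1 => simp [altMap]
  | case2 a => simp [altMap]
  | case3 a b r ih =>
    have h2 : (a :: b :: r).length = 2 + r.length := by simp; omega
    have hsh : ∀ k : Nat,
        encB ((a :: b :: r).getD (2 + k) ' ') (if (2 + k) % 2 = 0 then 13 else 5)
        = encB (r.getD k ' ') (if k % 2 = 0 then 13 else 5) := by
      intro k
      have e1 : (2 : Nat) + k = k + 1 + 1 := by omega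
      have e2 : (2 + k) % 2 = k % 2 := by omega
      rw [e1] at e2 ⊢
      rw [e2]
      rfl
    have hr2 : List.range 2 = [0, 1] := rfl
    rw [h2, List.range_add, hr2, List.map_append, List.map_map, altMap]
    simp only [List.map_cons, List.map_nil, Function.comp_def, hsh]
    simp only [List.cons_append, List.nil_append]
    simp only [List.getD_cons_zero, List.getD_cons_succ]
    norm_num
    simpa [List.getD_eq_getElem?_getD] using ih

lemma solve_eq_altMap (text : String) : solve text = String.ofList (altMap text.toList) := by
  have hbody : ∀ l : List Char, (fun (result : List Char) (i : Int) =>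
      let char := PySem.List.pyGetD l i ' '
      let s : Int := if PySem.Int.mod i 2 = 0 then 13 else 5
      if PySem.Chars.isupper char then
        result ++ [Char.ofNat (PySem.Int.mod ((char.toNat : Int) + s - 65) 26 + 65).toNat]
      else
        result ++ [Char.ofNat (PySem.Int.mod ((char.toNat : Int) + s - 97) 26 + 97).toNat])
      = fun result i => result ++
        [encB (PySem.List.pyGetD l i ' ') (if PySem.Int.mod i 2 = 0 then 13 else 5)] := by
    intro l
    funext result i
    by_cases h : PySem.Chars.isupper (PySem.List.pyGetD l i ' ') <;> simp [encB, h]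
  unfold solve
  simp only [hbody, PySem.List.foldl_append_singleton_eq_map, List.nil_append,
    PySem.List.pyRange_one]
  set l := text.toList with hl
  congr 1
  have hlen : (((l.length : Int)) - 0).toNat = l.length := by omega
  rw [hlen, List.map_map]
  rw [← mapG_eq_altMap l]
  apply List.map_congr_left
  intro k _
  simp only [Function.comp, zero_add, PySem.List.pyGetD_natCast]
  have hm2 : PySem.Int.mod (k : Int) 2 = ((k % 2 : Nat) : Int) := by
    exact_mod_cast PySem.Int.mod_natCast k 2
  rw [hm2]
  by_cases h : k % 2 = 0
  · have h' : ((k % 2 : Nat) : Int) = 0 := by simp [h]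
    rw [if_pos h', if_pos h]
  · have h' : ¬ ((k % 2 : Nat) : Int) = 0 := by
      omega
    rw [if_neg h', if_neg h]

lemma interleave_eq : ∀ l : List Char,
    (((evensL l).map (fun c => encB c 13)).zip ((evensL l.tail).map (fun c => encB c 5))).flatMap
        (fun p => [p.1, p.2]) ++
      (if ((evensL l.tail).map (fun c => encB c 5)).length
          < ((evensL l).map (fun c => encB c 13)).length then
        [PySem.List.pyGetD ((evensL l).map (fun c => encB c 13)) (-1) ' '] else [])
    = altMap l := by
  intro l
  induction l using altMap.induct with
  | case1 => simp [evensL, altMap]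
  | case2 a =>
    have hlast : PySem.List.pyGetD [encB a 13] (-1) ' ' = encB a 13 := by
      rw [PySem.List.pyGetD_neg_one _ _ (by simp)]
      simp
    simp [evensL, altMap, hlast]
  | case3 a b r ih =>
    have he : evensL (a :: b :: r) = a :: evensL r := rfl
    have ho : evensL (a :: b :: r).tail = b :: evensL r.tail := by
      rw [List.tail_cons, evensL_cons]
    rw [he, ho, altMap]
    simp only [List.map_cons, List.zip_cons_cons, List.flatMap_cons, List.length_cons]
    have hcond : (((evensL r.tail).map (fun c => encB c 5)).length + 1
        < ((evensL r).map (fun c => encB c 13)).length + 1)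
        ↔ (((evensL r.tail).map (fun c => encB c 5)).length
        < ((evensL r).map (fun c => encB c 13)).length) := by omega
    by_cases h : ((evensL r.tail).map (fun c => encB c 5)).length
        < ((evensL r).map (fun c => encB c 13)).length
    · have hne : ((evensL r).map (fun c => encB c 13)) ≠ [] := by
        intro hnil
        rw [hnil] at h
        simp at h
      have hlast : PySem.List.pyGetD (encB a 13 :: (evensL r).map (fun c => encB c 13)) (-1) ' '
          = PySem.List.pyGetD ((evensL r).map (fun c => encB c 13)) (-1) ' ' := by
        rw [PySem.List.pyGetD_neg_one _ _ (by simp), PySem.List.pyGetD_neg_one _ _ hne]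
        exact List.getLast_cons hne
      rw [if_pos (hcond.mpr h), hlast]
      rw [if_pos h] at ih
      simp [← ih]
    · rw [if_neg (fun hc => h (hcond.mp hc))]
      rw [if_neg h] at ih
      simp [← ih]

lemma solve_alt_eq_altMap (text : String) :
    solve_alt text = String.ofList (altMap text.toList) := by
  unfold solve_alt
  simp only [slice2_none, slice2_one, Option.getD_some,
    PySem.List.foldl_append_eq_flatMap, List.nil_append]
  rw [← interleave_eq text.toList]
  split_ifs with h <;> simp

-- ===== VERDICT (by name: the statement is the Claim_ definition above) =====
theorem solve_spec : Claim_equal_solve := by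
  intro text _
  unfold Spec_solve
  rw [solve_eq_altMap, solve_alt_eq_altMap]
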